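-- pv_equiv track=rewrite | github.com/karolskora1993/GrainGrothCA | Mesh.py | rule_1
-- ===== SOURCE A (Python) =====
-- def rule_1(nhood):
--     neighbours = {}
--     for k in range(3):
--         for l in range(3):
--             id = nhood[k][l]
--             if id != 0 and id != -1:
--                 if id in neighbours:
--                     neighbours[id] += 1
--                 else:
--                     neighbours[id] = 1
--     if neighbours:
--         point_id = max(neighbours, key=lambda key: neighbours[key])
--         if neighbours[point_id] >= 5:
--             return point_id
--     return 0
-- ===== SOURCE B (Python) =====
-- def rule_1(nhood):
--     cells = [nhood[k][l] for k in range(3) for l in range(3)]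
--     for c in cells:
--         if c != 0 and c != -1 and cells.count(c) >= 5:
--             return c
--     return 0
-- ===== Notes on version B (the rewrite author's own statement) =====
-- stated objective: simpler
-- what changed: Replaces the id->count dictionary plus max-by-count selection with a single scan that returns the first valid cell occurring at least 5 times among the 9 cells (such a strict-majority id is necessarily unique, so the max tie-break is irrelevant).
import Mathlib
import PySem

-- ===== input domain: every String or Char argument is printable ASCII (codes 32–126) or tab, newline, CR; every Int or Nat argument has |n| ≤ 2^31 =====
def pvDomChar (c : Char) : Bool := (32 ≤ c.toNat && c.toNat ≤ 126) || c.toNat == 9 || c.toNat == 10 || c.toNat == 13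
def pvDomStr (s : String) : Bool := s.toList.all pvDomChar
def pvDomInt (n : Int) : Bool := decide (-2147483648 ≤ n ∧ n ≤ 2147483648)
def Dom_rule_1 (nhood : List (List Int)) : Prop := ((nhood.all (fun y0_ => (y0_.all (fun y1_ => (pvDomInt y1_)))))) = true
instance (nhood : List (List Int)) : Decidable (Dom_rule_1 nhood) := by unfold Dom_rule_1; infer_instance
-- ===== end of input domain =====

-- B replaces A's id->count dictionary + max-by-count selection with a single scan returning
-- the first valid cell whose count among the 9 cells is >= 5 (a strict majority, hence unique);
-- objective: simpler.

-- ===== PORT A =====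
def rule_1 (nhood : List (List Int)) : Int :=
  let neighbours : PySem.Dict Int Int :=
    (PySem.List.pyRange 0 3 1).foldl (fun d k =>
      (PySem.List.pyRange 0 3 1).foldl (fun d l =>
        let id := (PySem.List.pyGet? ((PySem.List.pyGet? nhood k).getD []) l).getD 0
        if id ≠ 0 ∧ id ≠ -1 then
          if d.contains id then d.insert id (d.getD id 0 + 1) else d.insert id 1
        else d) d) PySem.Dict.empty
  if neighbours.size ≠ 0 then
    match PySem.List.max? neighbours.keys (fun key => neighbours.getD key 0) with
    | some point_id => if neighbours.getD point_id 0 ≥ 5 then point_id else 0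
    | none => 0
  else 0

-- ===== PORT B =====
def rule_1_alt (nhood : List (List Int)) : Int :=
  let cells := (PySem.List.pyRange 0 3 1).flatMap (fun k =>
    (PySem.List.pyRange 0 3 1).map (fun l =>
      (PySem.List.pyGet? ((PySem.List.pyGet? nhood k).getD []) l).getD 0))
  match cells.find? (fun c => !(c == 0) && !(c == -1) && decide (5 ≤ cells.count c)) with
  | some c => c
  | none => 0

-- ===== PRECONDITION & SPEC =====
-- Pre_ excludes exactly the inputs on which Python A raises IndexError: fewer than 3 rows,
-- or one of the first 3 rows having fewer than 3 entries.
def Pre_rule_1 (nhood : List (List Int)) : Prop :=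
  3 ≤ nhood.length ∧ ∀ row ∈ nhood.take 3, 3 ≤ row.length
instance (nhood : List (List Int)) : Decidable (Pre_rule_1 nhood) := by
  unfold Pre_rule_1; infer_instance
def pvWitness_rule_1 : List (List Int) := [[1, 1, 1], [1, 1, 2], [1, 0, -1]]
def Spec_rule_1 (nhood : List (List Int)) (out : Int) : Prop := out = rule_1_alt nhood
instance (nhood : List (List Int)) (out : Int) : Decidable (Spec_rule_1 nhood out) := by
  unfold Spec_rule_1; infer_instance

-- ===== CLAIM (what is proved, stated in full; the proofs are below) =====
def Claim_equal_rule_1 : Prop := ∀ (nhood : List (List Int)), Dom_rule_1 nhood → Pre_rule_1 nhood → Spec_rule_1 nhood (rule_1 nhood)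

-- ===== LEMMAS AND PROOFS =====
-- the 9 cells both ports read, in visit order
def cellsOf (nhood : List (List Int)) : List Int :=
  (PySem.List.pyRange 0 3 1).flatMap (fun k =>
    (PySem.List.pyRange 0 3 1).map (fun l =>
      (PySem.List.pyGet? ((PySem.List.pyGet? nhood k).getD []) l).getD 0))

def validB (c : Int) : Bool := !(c == 0) && !(c == -1)

theorem nested_foldl (g : Int → Int → Int) (F : PySem.Dict Int Int → Int → PySem.Dict Int Int)
    (ks ls : List Int) (init : PySem.Dict Int Int) :
    ks.foldl (fun d k => ls.foldl (fun d l => F d (g k l)) d) init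
    = (ks.flatMap (fun k => ls.map (g k))).foldl F init := by
  rw [List.foldl_flatMap]
  congr 1
  funext d k
  rw [List.foldl_map]

theorem neighbours_eq (nhood : List (List Int)) :
    ((PySem.List.pyRange 0 3 1).foldl (fun d k =>
      (PySem.List.pyRange 0 3 1).foldl (fun d l =>
        let id := (PySem.List.pyGet? ((PySem.List.pyGet? nhood k).getD []) l).getD 0
        if id ≠ 0 ∧ id ≠ -1 then
          if d.contains id then d.insert id (d.getD id 0 + 1) else d.insert id 1
        else d) d) (PySem.Dict.empty : PySem.Dict Int Int))
    = PySem.Dict.counter ((cellsOf nhood).filter validB) := by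
  have hF : (fun (d : PySem.Dict Int Int) (id : Int) =>
        if id ≠ 0 ∧ id ≠ -1 then
          (if d.contains id then d.insert id (d.getD id 0 + 1) else d.insert id 1)
        else d)
      = (fun (d : PySem.Dict Int Int) (id : Int) =>
        if validB id = true then d.insert id (d.getD id 0 + 1) else d) := by
    funext d id
    by_cases h0 : id = 0
    · simp [h0, validB]
    by_cases h1 : id = -1
    · simp [h1, validB]
    by_cases hc : d.contains id = true
    · simp [h0, h1, validB, hc]
    · simp [h0, h1, validB, hc,
        PySem.Dict.getD_of_not_contains d (0 : Int) (by simpa using hc)]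
  show ((PySem.List.pyRange 0 3 1).foldl (fun d k =>
      (PySem.List.pyRange 0 3 1).foldl (fun d l =>
        (fun (d : PySem.Dict Int Int) (id : Int) =>
          if id ≠ 0 ∧ id ≠ -1 then
            (if d.contains id then d.insert id (d.getD id 0 + 1) else d.insert id 1)
          else d) d
          ((fun k l => (PySem.List.pyGet? ((PySem.List.pyGet? nhood k).getD []) l).getD 0) k l)) d)
      (PySem.Dict.empty : PySem.Dict Int Int)) = _
  rw [hF, nested_foldl (fun k l => (PySem.List.pyGet? ((PySem.List.pyGet? nhood k).getD []) l).getD 0)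
      (fun (d : PySem.Dict Int Int) (id : Int) =>
        if validB id = true then d.insert id (d.getD id 0 + 1) else d),
    ← List.foldl_filter, PySem.Dict.foldl_insert_getD_add_one_eq_counter]
  rfl

theorem cells_length (nhood : List (List Int)) : (cellsOf nhood).length = 9 := by
  simp [cellsOf, show PySem.List.pyRange 0 3 1 = [0,1,2] by decide]

theorem two_count_le (l : List Int) (v w : Int) (h : v ≠ w) :
    l.count v + l.count w ≤ l.length := by
  induction l with
  | nil => simp
  | cons x t ih =>
    simp only [List.count_cons, List.length_cons]
    by_cases hv : x = v <;> by_cases hw : x = w <;> simp_all <;> omega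

theorem ports_agree (nhood : List (List Int)) : rule_1 nhood = rule_1_alt nhood := by
  simp only [rule_1, rule_1_alt]
  rw [neighbours_eq, show ((PySem.List.pyRange 0 3 1).flatMap (fun k =>
    (PySem.List.pyRange 0 3 1).map (fun l =>
      (PySem.List.pyGet? ((PySem.List.pyGet? nhood k).getD []) l).getD 0))) = cellsOf nhood from rfl]
  cases hfind : (cellsOf nhood).find? (fun c => !(c == 0) && !(c == -1) && decide (5 ≤ (cellsOf nhood).count c)) with
  | none =>
    have hall := List.find?_eq_none.mp hfind
    by_cases hV : (cellsOf nhood).filter validB = []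
    · simp [hV, PySem.Dict.counter]
    · cases hmax : PySem.List.max? (PySem.Dict.counter ((cellsOf nhood).filter validB)).keys
          (fun key => (PySem.Dict.counter ((cellsOf nhood).filter validB)).getD key 0) with
      | none => simp
      | some m =>
        have hmK := PySem.List.max?_mem hmax
        rw [PySem.Dict.keys_counter] at hmK
        have hmV : m ∈ (cellsOf nhood).filter validB := (PySem.Set.mem_ofList _ _).mp hmK
        have hmcells : m ∈ cellsOf nhood := List.mem_of_mem_filter hmV
        have hmvalid : validB m = true := List.of_mem_filter hmV
        have hpm := hall m hmcells
        rw [Bool.and_eq_true, Bool.and_eq_true] at hpm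
        simp only [validB, Bool.and_eq_true, Bool.not_eq_true', beq_eq_false_iff_ne, ne_eq] at hmvalid
        have hcnt : (cellsOf nhood).count m < 5 := by
          by_contra h
          exact hpm ⟨⟨by simpa using hmvalid.1, by simpa using hmvalid.2⟩, decide_eq_true (by omega)⟩
        have hgD : (PySem.Dict.counter ((cellsOf nhood).filter validB)).getD m 0
            = (((cellsOf nhood).filter validB).count m : Int) := PySem.Dict.getD_counter _ _
        have hcf : ((cellsOf nhood).filter validB).count m = (cellsOf nhood).count m :=
          List.count_filter (by simp [validB, hmvalid.1, hmvalid.2])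

        have h5 : ¬ ((PySem.Dict.counter ((cellsOf nhood).filter validB)).getD m 0 ≥ 5) := by
          rw [hgD, hcf]; omega
        by_cases hs : (PySem.Dict.counter ((cellsOf nhood).filter validB)).size ≠ 0
        · rw [if_pos hs]
          show (if (PySem.Dict.counter ((cellsOf nhood).filter validB)).getD m 0 ≥ 5 then m else 0) = (0 : Int)
          rw [if_neg h5]
        · rw [if_neg hs]
  | some c =>
    have hpc := List.find?_some hfind
    have hccells := List.mem_of_find?_eq_some hfind
    rw [Bool.and_eq_true, Bool.and_eq_true] at hpc
    obtain ⟨⟨hb0, hb1⟩, hbc⟩ := hpc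
    have hc0 : ¬ c = 0 := by simpa using hb0
    have hc1 : ¬ c = -1 := by simpa using hb1
    have hcnt : 5 ≤ (cellsOf nhood).count c := of_decide_eq_true hbc
    clear hbc
    have hcvalid : validB c = true := by simp [validB, hc0, hc1]
    have hcV : c ∈ (cellsOf nhood).filter validB := List.mem_filter.mpr ⟨hccells, hcvalid⟩
    have hcK : c ∈ (PySem.Dict.counter ((cellsOf nhood).filter validB)).keys := by
      rw [PySem.Dict.keys_counter]; exact (PySem.Set.mem_ofList _ _).mpr hcV
    have hkeysne : (PySem.Dict.counter ((cellsOf nhood).filter validB)).keys ≠ [] := by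
      intro h; rw [h] at hcK; simp at hcK
    have hsize : ¬ ((PySem.Dict.counter ((cellsOf nhood).filter validB)).size = 0) := by
      have hsk : (PySem.Dict.counter ((cellsOf nhood).filter validB)).size
          = (PySem.Dict.counter ((cellsOf nhood).filter validB)).keys.length := by
        simp [PySem.Dict.size, PySem.Dict.keys]
      rw [hsk]
      simpa [List.length_eq_zero_iff] using hkeysne
    cases hmax : PySem.List.max? (PySem.Dict.counter ((cellsOf nhood).filter validB)).keys
        (fun key => (PySem.Dict.counter ((cellsOf nhood).filter validB)).getD key 0) with
    | none => exact absurd ((PySem.List.max?_eq_none_iff _ _).mp hmax) hkeysne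
    | some m =>
      have hmK := PySem.List.max?_mem hmax
      rw [PySem.Dict.keys_counter] at hmK
      have hmV : m ∈ (cellsOf nhood).filter validB := (PySem.Set.mem_ofList _ _).mp hmK
      have hmcells : m ∈ cellsOf nhood := List.mem_of_mem_filter hmV
      have hmvalid : validB m = true := List.of_mem_filter hmV
      have hle := PySem.List.max?_isMax hmax c hcK
      have hgDc : (PySem.Dict.counter ((cellsOf nhood).filter validB)).getD c 0
          = (((cellsOf nhood).filter validB).count c : Int) := PySem.Dict.getD_counter _ _
      have hgDm : (PySem.Dict.counter ((cellsOf nhood).filter validB)).getD m 0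
          = (((cellsOf nhood).filter validB).count m : Int) := PySem.Dict.getD_counter _ _
      have hcfc : ((cellsOf nhood).filter validB).count c = (cellsOf nhood).count c :=
        List.count_filter hcvalid
      have hcfm : ((cellsOf nhood).filter validB).count m = (cellsOf nhood).count m :=
        List.count_filter hmvalid
      simp only [hgDc, hgDm, hcfc, hcfm] at hle
      have hmcnt : 5 ≤ (cellsOf nhood).count m := by omega
      have hmc : m = c := by
        by_contra hne
        have := two_count_le (cellsOf nhood) m c hne
        rw [cells_length] at this
        omega
      have h5 : (PySem.Dict.counter ((cellsOf nhood).filter validB)).getD m 0 ≥ 5 := by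
        rw [hgDm, hcfm]; omega
      rw [if_pos hsize]
      show (if (PySem.Dict.counter ((cellsOf nhood).filter validB)).getD m 0 ≥ 5 then m else 0) = c
      rw [if_pos h5]
      exact hmc

-- ===== VERDICT (by name: the statement is the Claim_ definition above) =====
theorem rule_1_spec : Claim_equal_rule_1 := by
  intro nhood _ _
  exact ports_agree nhood
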